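-- pv_equiv track=rewrite | github.com/rajmoham/Coding-Challenges | British Informatics Olympiad/2017/Q1.py | ReturnMissing
-- ===== SOURCE A (Python) =====
-- def ReturnMissing(left, right):
--     lst = ["R", "G", "B"]
--
--     for i in range(len(lst)):
--         if lst[i] == left:
--             del lst[i]
--             break
--     for i in range(len(lst)):
--         if lst[i] == right:
--             del lst[i]
--             break
--
--     return lst[0]
-- ===== SOURCE B (Python) =====
-- def ReturnMissing(left, right):
--     rem = [c for c in ("R", "G", "B") if c != left and c != right]
--     return rem[0]
-- ===== Notes on version B (the rewrite author's own statement) =====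
-- stated objective: simpler
-- what changed: A deletes left and right in two sequential scan-delete-break passes over a mutable list; B filters all three colors in one pass with a single predicate and returns the first survivor.
import Mathlib
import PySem

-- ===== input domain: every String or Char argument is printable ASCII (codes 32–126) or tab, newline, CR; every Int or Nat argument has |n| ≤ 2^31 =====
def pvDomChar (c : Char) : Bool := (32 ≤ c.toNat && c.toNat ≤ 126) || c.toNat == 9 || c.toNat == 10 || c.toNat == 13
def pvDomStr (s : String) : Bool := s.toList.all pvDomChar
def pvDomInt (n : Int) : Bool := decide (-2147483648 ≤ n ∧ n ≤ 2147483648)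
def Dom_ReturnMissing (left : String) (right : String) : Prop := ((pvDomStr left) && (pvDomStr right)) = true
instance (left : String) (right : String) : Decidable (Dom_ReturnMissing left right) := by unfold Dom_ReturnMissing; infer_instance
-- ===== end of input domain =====

-- ===== PORT A =====
-- B merges A's two scan-delete-break passes into one single-pass filter; objective: simpler.
-- the for-i/del/break loop of A: remove the first element equal to t (scan in order, stop at first hit)
def pvDelFirst (lst : List String) (t : String) : List String :=
  match lst with
  | [] => []
  | x :: xs => if x = t then xs else x :: pvDelFirst xs t

def ReturnMissing (left : String) (right : String) : String :=
  -- A's list after the two loops is never empty, so lst[0] never raises; headD "" is exact here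
  (pvDelFirst (pvDelFirst ["R", "G", "B"] left) right).headD ""

-- ===== PORT B =====
def ReturnMissing_alt (left : String) (right : String) : String :=
  (["R", "G", "B"].filter (fun c => c != left && c != right)).headD ""

-- ===== PRECONDITION & SPEC =====
def Spec_ReturnMissing (left : String) (right : String) (out : String) : Prop := out = ReturnMissing_alt left right
instance (left : String) (right : String) (out : String) : Decidable (Spec_ReturnMissing left right out) := by unfold Spec_ReturnMissing; infer_instance

-- ===== CLAIM (what is proved, stated in full; the proofs are below) =====
def Claim_equal_ReturnMissing : Prop := ∀ (left : String) (right : String), Dom_ReturnMissing left right → Spec_ReturnMissing left right (ReturnMissing left right)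

-- ===== LEMMAS AND PROOFS =====

-- ===== VERDICT (by name: the statement is the Claim_ definition above) =====
theorem ReturnMissing_spec : Claim_equal_ReturnMissing := by
  intro left right _
  unfold Spec_ReturnMissing ReturnMissing ReturnMissing_alt
  by_cases hl1 : left = "R" <;> by_cases hl2 : left = "G" <;> by_cases hl3 : left = "B" <;>
    by_cases hr1 : right = "R" <;> by_cases hr2 : right = "G" <;> by_cases hr3 : right = "B" <;>
    simp_all [pvDelFirst, @eq_comm String]
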